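-- pv_equiv track=rewrite | github.com/alexfrontendfr/network-mapper | backend/device_identifier.py | _analyze_mac_prefix
-- ===== SOURCE A (Python) =====
-- def _analyze_mac_prefix(mac: str) -> str:
--     """Analyze MAC address prefix for virtual machines and special devices"""
--     if not mac:
--         return None
--
--     mac = mac.lower()
--     if mac.startswith(('00:00:00', 'ff:ff:ff')):
--         return 'Virtual Interface'
--     if mac.startswith('01:00:5e'):
--         return 'Multicast Device'
--
--     vm_prefixes = ['00:05:69', '00:0c:29', '00:1c:14', '00:50:56', '00:1c:42']
--     if any(mac.startswith(prefix) for prefix in vm_prefixes):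
--         return 'Virtual Machine'
--
--     return None
-- ===== SOURCE B (Python) =====
-- _PREFIX_LABELS = {
--     '00:00:00': 'Virtual Interface',
--     'ff:ff:ff': 'Virtual Interface',
--     '01:00:5e': 'Multicast Device',
--     '00:05:69': 'Virtual Machine',
--     '00:0c:29': 'Virtual Machine',
--     '00:1c:14': 'Virtual Machine',
--     '00:50:56': 'Virtual Machine',
--     '00:1c:42': 'Virtual Machine',
-- }
--
-- def _analyze_mac_prefix(mac: str) -> str:
--     if not mac:
--         return None
--     return _PREFIX_LABELS.get(mac.lower()[:8])
-- ===== Notes on version B (the rewrite author's own statement) =====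
-- stated objective: idiomatic
-- what changed: Replaced the cascading startswith tests and the any() scan over a VM-prefix list with a single module-level dict keyed on the fixed 8-character prefix, so classification is one slice plus one table lookup.
import Mathlib
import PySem

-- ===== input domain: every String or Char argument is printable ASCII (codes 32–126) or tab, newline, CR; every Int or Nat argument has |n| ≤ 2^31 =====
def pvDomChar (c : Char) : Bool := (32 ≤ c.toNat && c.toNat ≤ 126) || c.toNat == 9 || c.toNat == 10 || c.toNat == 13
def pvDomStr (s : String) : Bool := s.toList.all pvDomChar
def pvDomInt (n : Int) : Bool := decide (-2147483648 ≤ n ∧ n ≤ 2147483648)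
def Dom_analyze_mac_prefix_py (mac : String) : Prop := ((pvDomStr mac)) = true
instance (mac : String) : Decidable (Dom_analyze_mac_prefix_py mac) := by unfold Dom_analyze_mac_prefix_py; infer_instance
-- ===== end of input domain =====

-- B replaces A's cascading startswith tests with one prefix→label table lookup on mac.lower()[:8] (idiomatic; same behaviour).


-- ===== PORT A =====
def analyze_mac_prefix_py (mac : String) : Option String :=
  if mac = "" then none
  else
    let m := PySem.Str.lower mac
    if PySem.Str.startswith m "00:00:00" || PySem.Str.startswith m "ff:ff:ff" then
      some "Virtual Interface"
    else if PySem.Str.startswith m "01:00:5e" then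
      some "Multicast Device"
    else
      let vm_prefixes := ["00:05:69", "00:0c:29", "00:1c:14", "00:50:56", "00:1c:42"]
      if vm_prefixes.any (fun p => PySem.Str.startswith m p) then
        some "Virtual Machine"
      else
        none

-- ===== PORT B =====
def pvPrefixLabels : PySem.Dict String String :=
  PySem.Dict.ofList
    [("00:00:00", "Virtual Interface"), ("ff:ff:ff", "Virtual Interface"),
     ("01:00:5e", "Multicast Device"),
     ("00:05:69", "Virtual Machine"), ("00:0c:29", "Virtual Machine"),
     ("00:1c:14", "Virtual Machine"), ("00:50:56", "Virtual Machine"),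
     ("00:1c:42", "Virtual Machine")]

def analyze_mac_prefix_py_alt (mac : String) : Option String :=
  if mac = "" then none
  else pvPrefixLabels.get? (PySem.Str.slice (PySem.Str.lower mac) none (some 8))

-- ===== PRECONDITION & SPEC =====
def Spec_analyze_mac_prefix_py (mac : String) (out : Option String) : Prop := out = analyze_mac_prefix_py_alt mac
instance (mac : String) (out : Option String) : Decidable (Spec_analyze_mac_prefix_py mac out) := by unfold Spec_analyze_mac_prefix_py; infer_instance

-- ===== CLAIM (what is proved, stated in full; the proofs are below) =====
def Claim_equal_analyze_mac_prefix_py : Prop := ∀ (mac : String), Dom_analyze_mac_prefix_py mac → Spec_analyze_mac_prefix_py mac (analyze_mac_prefix_py mac)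

-- ===== LEMMAS AND PROOFS =====

-- startswith by an 8-char prefix is the same test as equality of p with the 8-char slice
theorem sw_eq_slice (m p : String) (hp : p.toList.length = 8) :
    PySem.Str.startswith m p = (p == PySem.Str.slice m none (some 8)) := by
  have hsl : (PySem.Str.slice m none (some 8)).toList = m.toList.take 8 := by
    have h8 : ((8 : Int)) = ((8 : Nat) : Int) := by norm_num
    simp only [PySem.Str.toList_slice, PySem.Chars.slice_eq_listSlice, h8,
      PySem.List.slice_to_natCast]
  cases hsw : PySem.Str.startswith m p
  · symm
    rw [beq_eq_false_iff_ne]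
    intro hpe
    rw [PySem.Str.startswith_eq, ← Bool.not_eq_true, PySem.Chars.startswith_iff] at hsw
    apply hsw
    rw [hpe, hsl]
    exact List.take_prefix 8 m.toList
  · symm
    rw [beq_iff_eq]
    rw [PySem.Str.startswith_eq, PySem.Chars.startswith_iff, List.prefix_iff_eq_take, hp] at hsw
    apply String.ext
    show p.toList = (PySem.Str.slice m none (some 8)).toList
    rw [hsl, ← hsw]

-- the literal association list behind pvPrefixLabels
theorem pvPrefixLabels_mk : pvPrefixLabels = PySem.Dict.mk
    [("00:00:00", "Virtual Interface"), ("ff:ff:ff", "Virtual Interface"),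
     ("01:00:5e", "Multicast Device"),
     ("00:05:69", "Virtual Machine"), ("00:0c:29", "Virtual Machine"),
     ("00:1c:14", "Virtual Machine"), ("00:50:56", "Virtual Machine"),
     ("00:1c:42", "Virtual Machine")] := by decide

-- ===== VERDICT (by name: the statement is the Claim_ definition above) =====
theorem analyze_mac_prefix_py_spec : Claim_equal_analyze_mac_prefix_py := by
  intro mac _
  unfold Spec_analyze_mac_prefix_py analyze_mac_prefix_py analyze_mac_prefix_py_alt
  by_cases h0 : mac = ""
  · simp [h0]
  · simp only [h0, if_false]
    set m := PySem.Str.lower mac with hm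
    have e1 := sw_eq_slice m "00:00:00" (by decide)
    have e2 := sw_eq_slice m "ff:ff:ff" (by decide)
    have e3 := sw_eq_slice m "01:00:5e" (by decide)
    have e4 := sw_eq_slice m "00:05:69" (by decide)
    have e5 := sw_eq_slice m "00:0c:29" (by decide)
    have e6 := sw_eq_slice m "00:1c:14" (by decide)
    have e7 := sw_eq_slice m "00:50:56" (by decide)
    have e8 := sw_eq_slice m "00:1c:42" (by decide)
    set q := PySem.Str.slice m none (some 8) with hq
    simp only [List.any_cons, List.any_nil, Bool.or_false, e1, e2, e3, e4, e5, e6, e7, e8,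
      pvPrefixLabels_mk, PySem.Dict.get?_mk_cons]
    split_ifs <;> simp_all [PySem.Dict.get?]
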